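-- pv_equiv track=rewrite | github.com/sunny-ops/Amazon_OA | K-Repetitiveness Feature Value.py | getkRepValue
-- ===== SOURCE A (Python) =====
-- from collections import Counter
--
-- def getkRepValue(user_history: str, k: int):
--   cnt = 0
--   l = 0
--   c = Counter()
--   for r in range(len(user_history)):
--     c[user_history[r]] += 1
--     while max(c.values()) >= k:
--       c[user_history[l]] -= 1
--       l += 1
--     # [l, r] is the shortest invalid ending at r
--     cnt += l
--   return cnt
-- ===== SOURCE B (Python) =====
-- def getkRepValue(user_history: str, k: int):
--   # O(n): for each endpoint r, the shortest invalid window start is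
--   # 1 + (largest k-th-from-last occurrence position seen so far).
--   occ = {}
--   bound = -1
--   total = 0
--   for r, ch in enumerate(user_history):
--     ps = occ.setdefault(ch, [])
--     ps.append(r)
--     if len(ps) >= k:
--       p = ps[len(ps) - k]
--       if p > bound:
--         bound = p
--     total += bound + 1
--   return total
-- ===== Notes on version B (the rewrite author's own statement) =====
-- stated objective: faster
-- what changed: B replaces A's inner shrinking loop with a recomputed max over all Counter values by a direct O(n) formula: for each endpoint the shortest invalid window start is 1 + the running maximum of the k-th-from-last occurrence position of any character, maintained from per-character occurrence lists.
import Mathlib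
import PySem

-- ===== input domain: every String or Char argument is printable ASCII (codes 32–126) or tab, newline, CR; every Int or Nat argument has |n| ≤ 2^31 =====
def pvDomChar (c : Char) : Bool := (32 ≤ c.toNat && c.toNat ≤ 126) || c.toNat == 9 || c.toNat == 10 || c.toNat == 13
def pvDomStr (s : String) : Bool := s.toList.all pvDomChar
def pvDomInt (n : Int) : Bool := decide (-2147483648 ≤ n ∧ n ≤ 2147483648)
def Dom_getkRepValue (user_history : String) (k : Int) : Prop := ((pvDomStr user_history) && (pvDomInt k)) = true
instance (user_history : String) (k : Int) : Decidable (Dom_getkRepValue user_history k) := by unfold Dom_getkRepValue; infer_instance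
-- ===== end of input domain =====

-- B replaces A's shrink-loop-with-recomputed-max by an O(n) running maximum of
-- k-th-from-last occurrence positions; Pre_ excludes the inputs where A raises.


-- ===== PORT A =====
-- inner 'while max(c.values()) >= k' loop of A; fuel bounds the iteration count
-- (inside Pre_ the loop runs at most r+1-l ≤ |s| times); the 'none' branches are
-- where Python raises (ValueError on empty max / IndexError), unreachable under Pre_.
def getkRepValueShrink (s : List Char) (k : Int) : Nat → Int → PySem.Dict Char Int → Int × PySem.Dict Char Int
  | 0, l, c => (l, c)
  | fuel+1, l, c =>
    match PySem.List.max? (PySem.Dict.values c) (fun v => v) with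
    | none => (l, c)
    | some m =>
      if k ≤ m then
        match PySem.List.pyGet? s l with
        | none => (l, c)
        | some ch => getkRepValueShrink s k fuel (l + 1) (c.modify ch 0 (· - 1))
      else (l, c)

-- loop body of A's 'for r in range(len(user_history))'
def getkRepValueStep (s : List Char) (k : Int) (n : Nat)
    (st : Int × Int × PySem.Dict Char Int) (r : Int) : Int × Int × PySem.Dict Char Int :=
  match PySem.List.pyGet? s r with
  | none => st
  | some ch =>
    let c1 := st.2.2.modify ch 0 (· + 1)
    let p := getkRepValueShrink s k (n + 1) st.2.1 c1
    (st.1 + p.1, p.1, p.2)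

def getkRepValue (user_history : String) (k : Int) : Int :=
  let s := user_history.toList
  ((PySem.List.pyRange 0 (PySem.List.len s) 1).foldl (getkRepValueStep s k s.length)
    ((0 : Int), (0 : Int), PySem.Dict.empty)).1

-- ===== PORT B =====
-- loop body of B's 'for r, ch in enumerate(user_history)'
def getkRepValueAltStep (k : Int)
    (st : PySem.Dict Char (List Int) × Int × Int) (p : Int × Char) :
    PySem.Dict Char (List Int) × Int × Int :=
  let ps := (st.1.getD p.2 []) ++ [p.1]
  let occ' := st.1.insert p.2 ps
  let bound' :=
    if k ≤ (ps.length : Int) then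
      match PySem.List.pyGet? ps ((ps.length : Int) - k) with
      | none => st.2.1
      | some q => if st.2.1 < q then q else st.2.1
    else st.2.1
  (occ', bound', st.2.2 + (bound' + 1))

def getkRepValue_alt (user_history : String) (k : Int) : Int :=
  let s := user_history.toList
  ((PySem.List.enumerate s 0).foldl (getkRepValueAltStep k)
    (PySem.Dict.empty, -1, 0)).2.2

-- ===== PRECONDITION & SPEC =====
-- Pre_ excludes exactly the inputs where A raises: for k ≤ 0 on a nonempty string
-- the while loop never stops and user_history[l] raises IndexError (B raises there too).
def Pre_getkRepValue (user_history : String) (k : Int) : Prop :=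
  user_history.toList = [] ∨ 1 ≤ k
instance (user_history : String) (k : Int) : Decidable (Pre_getkRepValue user_history k) := by
  unfold Pre_getkRepValue; infer_instance

def pvWitness_getkRepValue : String × Int := ("aabcaab", 2)

def Spec_getkRepValue (user_history : String) (k : Int) (out : Int) : Prop := out = getkRepValue_alt user_history k
instance (user_history : String) (k : Int) (out : Int) : Decidable (Spec_getkRepValue user_history k out) := by unfold Spec_getkRepValue; infer_instance

-- ===== CLAIM (what is proved, stated in full; the proofs are below) =====
def Claim_equal_getkRepValue : Prop := ∀ (user_history : String) (k : Int), Dom_getkRepValue user_history k → Pre_getkRepValue user_history k → Spec_getkRepValue user_history k (getkRepValue user_history k)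

-- ===== LEMMAS AND PROOFS =====

def wcount (s : List Char) (x : Char) (j m : Nat) : Nat := ((s.take m).drop j).count x

lemma wcount_zero_of_le (s : List Char) (x : Char) (j m : Nat) (h : m ≤ j) :
    wcount s x j m = 0 := by
  unfold wcount
  rw [List.drop_eq_nil_of_le (by simp [List.length_take]; omega)]
  simp

lemma wcount_anti (s : List Char) (x : Char) (j j' m : Nat) (h : j ≤ j') :
    wcount s x j' m ≤ wcount s x j m := by
  unfold wcount
  have : (s.take m).drop j' = ((s.take m).drop j).drop (j' - j) := by
    rw [List.drop_drop]; congr 1; omega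
  rw [this]
  exact (List.drop_sublist _ _).count_le x

lemma wcount_succ_right (s : List Char) (x : Char) (j m : Nat) (hm : m < s.length) :
    wcount s x j (m+1) = wcount s x j m + (if j ≤ m ∧ s[m] = x then 1 else 0) := by
  unfold wcount
  rw [List.take_add_one, List.getElem?_eq_getElem hm]
  by_cases hj : j ≤ m
  · rw [List.drop_append_of_le_length (by simp [List.length_take]; omega)]
    rw [List.count_append]
    by_cases hx : s[m] = x <;> simp [hx, hj]
  · rw [List.drop_eq_nil_of_le (by simp [List.length_take]; omega),
        List.drop_eq_nil_of_le (by simp [List.length_take]; omega)]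
    simp [hj]

lemma wcount_stable (s : List Char) (x : Char) (j m : Nat) (hm : s.length ≤ m) :
    wcount s x j (m+1) = wcount s x j m := by
  unfold wcount
  rw [List.take_of_length_le hm, List.take_of_length_le (by omega)]

lemma wcount_mono_right (s : List Char) (x : Char) (j m : Nat) :
    wcount s x j m ≤ wcount s x j (m+1) := by
  by_cases hm : m < s.length
  · rw [wcount_succ_right s x j m hm]; omega
  · rw [wcount_stable s x j m (by omega)]

lemma wcount_cons_left (s : List Char) (x : Char) (j m : Nat) (hj : j < m) (hm : m ≤ s.length) :
    wcount s x j m = wcount s x (j+1) m + (if s[j]'(lt_of_lt_of_le hj hm) = x then 1 else 0) := by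
  unfold wcount
  rw [List.drop_eq_getElem_cons (by simp [List.length_take]; omega)]
  rw [List.count_cons]
  rw [List.getElem_take]
  by_cases hx : s[j]'(lt_of_lt_of_le hj hm) = x <;> simp [hx]

def occL (s : List Char) (x : Char) : Nat → List Int
  | 0 => []
  | m+1 => occL s x m ++ (if s[m]? = some x then [(m : Int)] else [])

lemma occL_length (s : List Char) (x : Char) (m : Nat) :
    (occL s x m).length = wcount s x 0 m := by
  induction m with
  | zero => simp [occL, wcount]
  | succ m ih =>
    by_cases hm : m < s.length
    · rw [wcount_succ_right s x 0 m hm]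
      simp only [occL, List.length_append, ih, List.getElem?_eq_getElem hm]
      by_cases hx : s[m] = x <;> simp [hx]
    · rw [wcount_stable s x 0 m (by omega)]
      have hnone : s[m]? = none := List.getElem?_eq_none (by omega)
      simp [occL, hnone, ih]

lemma occL_bounds (s : List Char) (x : Char) (m : Nat) :
    ∀ p ∈ occL s x m, 0 ≤ p ∧ p < (m : Int) := by
  induction m with
  | zero => simp [occL]
  | succ m ih =>
    intro p hp
    simp only [occL, List.mem_append] at hp
    rcases hp with hp | hp
    · have := ih p hp
      refine ⟨this.1, by push_cast; omega⟩
    · split at hp <;> simp at hp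
      subst hp
      refine ⟨by positivity, by push_cast; omega⟩

lemma occL_sorted (s : List Char) (x : Char) (m : Nat) :
    (occL s x m).Pairwise (· < ·) := by
  induction m with
  | zero => simp [occL]
  | succ m ih =>
    simp only [occL]
    apply List.pairwise_append.mpr
    refine ⟨ih, ?_, ?_⟩
    · split <;> simp
    · intro p hp q hq
      have hb := occL_bounds s x m p hp
      split at hq <;> simp at hq
      subst hq; exact hb.2

lemma occL_filter (s : List Char) (x : Char) (m j : Nat) :
    wcount s x j m = ((occL s x m).filter (fun p => (j : Int) ≤ p)).length := by
  induction m with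
  | zero => simp [occL, wcount]
  | succ m ih =>
    by_cases hm : m < s.length
    · rw [wcount_succ_right s x j m hm]
      simp only [occL, List.getElem?_eq_getElem hm, List.filter_append]
      by_cases hx : s[m] = x
      · by_cases hj : j ≤ m
        · simp [hx, hj, ih, show (j:Int) ≤ (m:Int) by exact_mod_cast hj]
        · have h1 : wcount s x j m = 0 := wcount_zero_of_le s x j m (by omega)
          have h2 : ¬ ((j:Int) ≤ (m:Int)) := by omega
          -- filter over occL s x m is empty: all elements < m < j
          have h3 : (occL s x m).filter (fun p => decide ((j:Int) ≤ p)) = [] := by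
            apply List.filter_eq_nil_iff.mpr
            intro p hp
            have := occL_bounds s x m p hp
            simp only [decide_eq_true_eq, not_le]
            omega
          simp [hx, hj, h1, h2, h3]
      · simp [hx, ih]
    · rw [wcount_stable s x j m (by omega)]
      have hnone : s[m]? = none := List.getElem?_eq_none (by omega)
      simp [occL, hnone, ih]

lemma kth_filter (ps : List Int) (hs : ps.Pairwise (· < ·)) (K : Nat) (hK : 0 < K) :
    ∀ (p : Int), ps[ps.length - K]? = some p → K ≤ ps.length →
    ∀ (j : Int), (K ≤ (ps.filter (fun q => j ≤ q)).length ↔ j ≤ p) := by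
  induction ps with
  | nil => intro p hp hlen j; simp at hlen; omega
  | cons q rest ih =>
    intro p hp hlen j
    have hrest : ∀ r ∈ rest, q < r := fun r hr => (List.pairwise_cons.mp hs).1 r hr
    by_cases hj : j ≤ q
    · -- filter keeps everything
      have hfil : (q :: rest).filter (fun r => decide (j ≤ r)) = q :: rest := by
        apply List.filter_eq_self.mpr
        intro r hr
        simp only [decide_eq_true_eq]
        rcases List.mem_cons.mp hr with h | h
        · omega
        · have := hrest r h; omega
      have hpmem : p ∈ q :: rest := List.mem_of_getElem? hp
      constructor
      · intro _
        rcases List.mem_cons.mp hpmem with h | h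
        · omega
        · have := hrest p h; omega
      · intro _
        simpa [hfil] using hlen
    · have hfil : (q :: rest).filter (fun r => decide (j ≤ r)) = rest.filter (fun r => decide (j ≤ r)) := by
        simp [hj]
      rw [hfil]
      by_cases hK2 : K ≤ rest.length
      · have hidx : (q :: rest).length - K = (rest.length - K) + 1 := by simp; omega
        rw [hidx] at hp
        simp only [List.getElem?_cons_succ] at hp
        exact ih (List.pairwise_cons.mp hs).2 p hp hK2 j
      · have hKeq : K = rest.length + 1 := by simp at hlen; omega
        have hidx : (q :: rest).length - K = 0 := by simp; omega
        rw [hidx] at hp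
        simp only [List.getElem?_cons_zero, Option.some.injEq] at hp
        subst hp
        constructor
        · intro hge
          have := List.length_filter_le (fun r => decide (j ≤ r)) rest
          omega
        · intro h; omega

noncomputable def Lmin (s : List Char) (K m : Nat) : Nat := sInf {j | ∀ x, wcount s x j m < K}

lemma Lmin_nonempty (s : List Char) (K m : Nat) (hK : 0 < K) :
    m ∈ {j | ∀ x, wcount s x j m < K} := by
  intro x
  rw [wcount_zero_of_le s x m m le_rfl]
  omega

lemma Lmin_le (s : List Char) (K m : Nat) (hK : 0 < K) : Lmin s K m ≤ m :=
  Nat.sInf_le (Lmin_nonempty s K m hK)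

lemma Lmin_valid (s : List Char) (K m : Nat) (hK : 0 < K) :
    ∀ x, wcount s x (Lmin s K m) m < K :=
  Nat.sInf_mem ⟨m, Lmin_nonempty s K m hK⟩

lemma Lmin_min (s : List Char) (K m j : Nat) (_hK : 0 < K) (hj : j < Lmin s K m) :
    ∃ x, K ≤ wcount s x j m := by
  have := Nat.notMem_of_lt_sInf hj
  simp only [Set.mem_setOf_eq, not_forall, not_lt] at this
  exact this

lemma Lmin_zero (s : List Char) (K : Nat) (hK : 0 < K) : Lmin s K 0 = 0 :=
  Nat.le_zero.mp (Lmin_le s K 0 hK)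

lemma Lmin_mono (s : List Char) (K m : Nat) (hK : 0 < K) :
    Lmin s K m ≤ Lmin s K (m+1) := by
  apply Nat.sInf_le
  intro x
  calc wcount s x (Lmin s K (m+1)) m ≤ wcount s x (Lmin s K (m+1)) (m+1) :=
        wcount_mono_right s x _ m
    _ < K := Lmin_valid s K (m+1) hK x

lemma max?_isSome_of_ne_nil {xs : List Int} (h : xs ≠ []) :
    ∃ v, PySem.List.max? xs (fun v => v) = some v := by
  rcases xs with _ | ⟨a, rest⟩
  · exact absurd rfl h
  · clear h
    show ∃ v, List.foldl _ (some a) rest = some v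
    induction rest generalizing a with
    | nil => exact ⟨a, rfl⟩
    | cons b l ih =>
      simp only [List.foldl_cons]
      split <;> apply ih

lemma values_ne_nil_of_contains {κ ν : Type} [BEq κ] [LawfulBEq κ]
    (d : PySem.Dict κ ν) (x : κ) (h : d.contains x = true) :
    d.values ≠ [] := by
  intro hnil
  have hx := (PySem.Dict.contains_iff_mem_keys d x).mp h
  have : d.items = [] := by
    have := congrArg List.length hnil
    simpa [PySem.Dict.values] using List.length_eq_zero_iff.mp (by simpa [PySem.Dict.values] using this)
  simp [PySem.Dict.keys, this] at hx

lemma max_cond (c : PySem.Dict Char Int) (k : Int) (hk : 1 ≤ k)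
    (hnd : c.keys.Nodup) (hne : c.values ≠ []) :
    ∃ v, PySem.List.max? c.values (fun v => v) = some v ∧
      ((k ≤ v) ↔ ∃ x, k ≤ c.getD x 0) := by
  obtain ⟨v, hv⟩ := max?_isSome_of_ne_nil hne
  refine ⟨v, hv, ?_, ?_⟩
  · intro hkv
    have hvmem : v ∈ c.values := PySem.List.max?_mem hv
    rw [PySem.Dict.values_eq_map_keys c hnd 0] at hvmem
    obtain ⟨x, _, hx⟩ := List.mem_map.mp hvmem
    exact ⟨x, hx ▸ hkv⟩
  · rintro ⟨x, hx⟩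
    by_cases hcont : c.contains x = true
    · have hmem : c.getD x 0 ∈ c.values := by
        rw [PySem.Dict.values_eq_map_keys c hnd 0]
        exact List.mem_map.mpr ⟨x, (PySem.Dict.contains_iff_mem_keys c x).mp hcont, rfl⟩
      exact le_trans hx (PySem.List.max?_isMax hv _ hmem)
    · rw [PySem.Dict.getD_of_not_contains c 0 (by simpa using hcont)] at hx
      omega

lemma shrink_eq (s : List Char) (k : Int) (K : Nat) (hkK : k = (K : Int)) (hK : 0 < K)
    (m : Nat) (hm : m ≤ s.length) (t : Nat) (ht : t ≤ m)
    (hstop : ∀ x, wcount s x t m < K) :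
    ∀ (fuel l : Nat) (c : PySem.Dict Char Int), l ≤ t → t - l < fuel →
    (∀ x, c.getD x 0 = (wcount s x l m : Int)) → c.keys.Nodup → c.values ≠ [] →
    (∀ j, l ≤ j → j < t → ∃ x, K ≤ wcount s x j m) →
    ∃ c', getkRepValueShrink s k fuel (l : Int) c = ((t : Int), c') ∧
      (∀ x, c'.getD x 0 = (wcount s x t m : Int)) ∧ c'.keys.Nodup := by
  intro fuel
  induction fuel with
  | zero => intro l c _ h; omega
  | succ fuel ih =>
    intro l c hlt hfuel hc hnd hne hgo
    obtain ⟨v, hv, hviff⟩ := max_cond c k (by omega) hnd hne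
    by_cases hlt' : l < t
    · -- the loop condition holds: one more shrink step
      have hcond : k ≤ v := by
        apply hviff.mpr
        obtain ⟨x, hx⟩ := hgo l le_rfl hlt'
        exact ⟨x, by rw [hc x, hkK]; exact_mod_cast hx⟩
      have hls : l < s.length := by omega
      have hget : PySem.List.pyGet? s (l : Int) = some (s[l]'hls) := by
        rw [PySem.List.pyGet?_natCast, List.getElem?_eq_getElem hls]
      have hstep : getkRepValueShrink s k (fuel+1) (l : Int) c
          = getkRepValueShrink s k fuel ((l : Int) + 1) (c.modify (s[l]'hls) 0 (· - 1)) := by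
        simp only [getkRepValueShrink, hv, if_pos hcond, hget]
      have hcast : ((l : Int) + 1) = ((l + 1 : Nat) : Int) := by push_cast; ring
      rw [hstep, hcast]
      apply ih (l+1) _ (by omega) (by omega)
      · intro x
        rw [PySem.Dict.getD_modify, hc x, hc (s[l]'hls)]
        have hw := wcount_cons_left s x l m (by omega) hm
        by_cases hx : x = s[l]'hls
        · rw [if_pos hx]
          subst hx
          rw [if_pos rfl] at hw
          push_cast [hw]; ring
        · rw [if_neg hx]
          rw [if_neg (fun hh => hx hh.symm)] at hw
          omega
      · rw [PySem.Dict.keys_modify]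
        exact PySem.Dict.nodup_keys_insert _ _ _ hnd
      · apply values_ne_nil_of_contains _ (s[l]'hls)
        rw [PySem.Dict.contains_modify]
        simp
      · intro j hj1 hj2
        exact hgo j (by omega) hj2
    · -- l = t : the loop condition fails and the loop stops
      have hleq : l = t := by omega
      subst hleq
      have hcond : ¬ k ≤ v := by
        intro hkv
        obtain ⟨x, hx⟩ := hviff.mp hkv
        rw [hc x, hkK] at hx
        have := hstop x
        omega
      refine ⟨c, ?_, hc, hnd⟩
      simp only [getkRepValueShrink, hv, if_neg hcond]

noncomputable def SumL (s : List Char) (K m : Nat) : Int :=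
  ((List.range m).map (fun r => (Lmin s K (r+1) : Int))).sum

lemma A_inv (s : List Char) (k : Int) (K : Nat) (hkK : k = (K : Int)) (hK : 0 < K) :
    ∀ m, m ≤ s.length →
    ∃ c, (List.range m).foldl (fun st (r : Nat) => getkRepValueStep s k s.length st (r : Int))
        ((0 : Int), (0 : Int), PySem.Dict.empty)
      = (SumL s K m, (Lmin s K m : Int), c) ∧
      (∀ x, c.getD x 0 = (wcount s x (Lmin s K m) m : Int)) ∧ c.keys.Nodup := by
  intro m
  induction m with
  | zero =>
    intro _
    refine ⟨PySem.Dict.empty, ?_, ?_, PySem.Dict.nodup_keys_empty⟩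
    · simp [SumL, Lmin_zero s K hK]
    · intro x
      rw [Lmin_zero s K hK, wcount_zero_of_le s x 0 0 le_rfl]
      simp [PySem.Dict.getD_empty]
  | succ m ih =>
    intro hm1
    have hm : m ≤ s.length := by omega
    have hms : m < s.length := by omega
    obtain ⟨c, hfold, hc, hnd⟩ := ih hm
    rw [List.range_succ, List.foldl_append, hfold]
    simp only [List.foldl_cons, List.foldl_nil]
    have hget : PySem.List.pyGet? s (m : Int) = some (s[m]'hms) := by
      rw [PySem.List.pyGet?_natCast, List.getElem?_eq_getElem hms]
    set ch := s[m]'hms with hch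
    set c1 := c.modify ch 0 (· + 1) with hc1
    have hc1inv : ∀ x, c1.getD x 0 = (wcount s x (Lmin s K m) (m+1) : Int) := by
      intro x
      rw [hc1, PySem.Dict.getD_modify, hc x, hc ch]
      have hw := wcount_succ_right s x (Lmin s K m) m hms
      have hle : Lmin s K m ≤ m := Lmin_le s K m hK
      by_cases hx : x = ch
      · subst hx
        rw [if_pos rfl]
        rw [if_pos ⟨hle, hch.symm⟩] at hw
        push_cast [hw]; ring
      · rw [if_neg hx]
        rw [if_neg (by rintro ⟨-, hh⟩; exact hx (hh ▸ hch ▸ rfl))] at hw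
        omega
    have hshr := shrink_eq s k K hkK hK (m+1) (by omega) (Lmin s K (m+1))
      (Lmin_le s K (m+1) hK) (Lmin_valid s K (m+1) hK)
      (s.length + 1) (Lmin s K m) c1
      (Lmin_mono s K m hK)
      (by have := Lmin_le s K (m+1) hK; omega)
      hc1inv
      (by rw [hc1, PySem.Dict.keys_modify]; exact PySem.Dict.nodup_keys_insert _ _ _ hnd)
      (by apply values_ne_nil_of_contains _ ch; rw [hc1, PySem.Dict.contains_modify]; simp)
      (fun j _ hj2 => Lmin_min s K (m+1) j hK hj2)
    obtain ⟨c', hrun, hc', hnd'⟩ := hshr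
    refine ⟨c', ?_, hc', hnd'⟩
    simp only [getkRepValueStep, hget]
    rw [← hc1, hrun]
    simp [SumL, List.range_succ]

lemma B_inv (s : List Char) (k : Int) (K : Nat) (hkK : k = (K : Int)) (hK : 0 < K) :
    ∀ m, m ≤ s.length →
    ∃ occ, (PySem.List.enumerate (s.take m) 0).foldl (getkRepValueAltStep k)
        (PySem.Dict.empty, -1, 0)
      = (occ, (Lmin s K m : Int) - 1, SumL s K m) ∧
      (∀ x, occ.getD x [] = occL s x m) := by
  intro m
  induction m with
  | zero =>
    intro _
    refine ⟨PySem.Dict.empty, ?_, fun x => by simp [PySem.Dict.getD_empty, occL]⟩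
    simp [SumL, Lmin_zero s K hK]
  | succ m ih =>
    intro hm1
    have hm : m ≤ s.length := by omega
    have hms : m < s.length := by omega
    obtain ⟨occ, hfold, hocc⟩ := ih hm
    set ch := s[m]'hms with hch
    have htake : s.take (m+1) = s.take m ++ [ch] := by
      rw [List.take_add_one, List.getElem?_eq_getElem hms]
      rfl
    have hlen : (s.take m).length = m := by simp [List.length_take]; omega
    rw [htake, PySem.List.enumerate_append, hlen, List.foldl_append, hfold]
    have hsingle : PySem.List.enumerate [ch] ((0 : Int) + (m : Nat)) = [((m : Int), ch)] := by
      simp [PySem.List.enumerate_cons, PySem.List.enumerate_nil]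
    rw [hsingle]
    simp only [List.foldl_cons, List.foldl_nil]
    -- the appended ps is exactly the occurrence list up to m+1
    have hsm : s[m]? = some ch := List.getElem?_eq_getElem hms
    have hps : occ.getD ch [] ++ [(m : Int)] = occL s ch (m+1) := by
      rw [hocc ch]; simp [occL, hsm]
    have hPSlen : (occL s ch (m+1)).length = wcount s ch 0 (m+1) := occL_length s ch (m+1)
    -- the new occurrence dict is correct either way
    have hocc' : ∀ x, (occ.insert ch (occL s ch (m+1))).getD x [] = occL s x (m+1) := by
      intro x
      rw [PySem.Dict.getD_insert]
      by_cases hx : x = ch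
      · rw [if_pos hx, hx]
      · rw [if_neg hx, hocc x]
        simp only [occL]
        rw [if_neg (by rw [hsm]; simp; exact fun hh => hx hh.symm)]
        simp
    -- validity transfer for characters other than ch
    have hother : ∀ x, x ≠ ch → ∀ j, wcount s x j (m+1) = wcount s x j m := by
      intro x hx j
      rw [wcount_succ_right s x j m hms, if_neg (by rintro ⟨-, hh⟩; exact hx (hh ▸ hch ▸ rfl))]
      simp
    simp only [getkRepValueAltStep, hps]
    by_cases hbig : k ≤ ((occL s ch (m+1)).length : Int)
    · have hKlen : K ≤ (occL s ch (m+1)).length := by rw [hkK] at hbig; exact_mod_cast hbig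
      have hidx : (occL s ch (m+1)).length - K < (occL s ch (m+1)).length := by omega
      set p := (occL s ch (m+1))[(occL s ch (m+1)).length - K]'hidx with hpdef
      have hget : PySem.List.pyGet? (occL s ch (m+1)) (((occL s ch (m+1)).length : Int) - k) = some p := by
        rw [hkK, show ((occL s ch (m+1)).length : Int) - (K : Int) = (((occL s ch (m+1)).length - K : Nat) : Int) by omega]
        rw [PySem.List.pyGet?_natCast, List.getElem?_eq_getElem hidx]
      have hp0 : 0 ≤ p ∧ p < ((m : Int) + 1) := by
        have := occL_bounds s ch (m+1) p (by rw [hpdef]; exact List.getElem_mem hidx)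
        push_cast at this ⊢
        exact this
      have hkth := kth_filter (occL s ch (m+1)) (occL_sorted s ch (m+1)) K hK p
        (List.getElem?_eq_getElem hidx) hKlen
      -- the least valid start at m+1 is max (Lmin m) (p.toNat + 1)
      have hLm : Lmin s K (m+1) = max (Lmin s K m) (p.toNat + 1) := by
        apply le_antisymm
        · apply Nat.sInf_le
          intro x
          by_cases hx : x = ch
          · subst hx
            rw [occL_filter s ch (m+1)]
            by_contra hcon
            push Not at hcon
            have := (hkth _).mp hcon
            omega
          · rw [hother x hx]
            calc wcount s x (max (Lmin s K m) (p.toNat + 1)) m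
                ≤ wcount s x (Lmin s K m) m := wcount_anti s x _ _ m (le_max_left _ _)
              _ < K := Lmin_valid s K m hK x
        · by_contra hcon
          push Not at hcon
          have hinv : ∃ x, K ≤ wcount s x (Lmin s K (m+1)) (m+1) := by
            rcases lt_max_iff.mp hcon with hlt | hlt
            · obtain ⟨x, hx⟩ := Lmin_min s K m _ hK hlt
              exact ⟨x, le_trans hx (wcount_mono_right s x _ m)⟩
            · refine ⟨ch, ?_⟩
              rw [occL_filter s ch (m+1)]
              apply (hkth _).mpr
              omega
          obtain ⟨x, hx⟩ := hinv
          have := Lmin_valid s K (m+1) hK x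
          omega
      have harith : (if (Lmin s K m : Int) - 1 < p then p else (Lmin s K m : Int) - 1)
          = (Lmin s K (m+1) : Int) - 1 := by
        rw [hLm]
        push_cast [Nat.cast_max]
        omega
      have hsum : SumL s K m + ((Lmin s K (m+1) : Int) - 1 + 1) = SumL s K (m+1) := by
        simp [SumL, List.range_succ]
      rw [if_pos hbig, hget]
      refine ⟨_, ?_, hocc'⟩
      simp only [harith, hsum]
    · -- the count of ch stays below K: the least valid start is unchanged
      have hKlen : (occL s ch (m+1)).length < K := by
        rw [hkK] at hbig; push Not at hbig; exact_mod_cast hbig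
      have hLm : Lmin s K (m+1) = Lmin s K m := by
        apply le_antisymm
        · apply Nat.sInf_le
          intro x
          by_cases hx : x = ch
          · subst hx
            calc wcount s ch (Lmin s K m) (m+1)
                ≤ wcount s ch 0 (m+1) := wcount_anti s ch 0 _ (m+1) (Nat.zero_le _)
              _ = (occL s ch (m+1)).length := hPSlen.symm
              _ < K := hKlen
          · rw [hother x hx]
            exact Lmin_valid s K m hK x
        · exact Lmin_mono s K m hK
      rw [if_neg hbig]
      refine ⟨_, ?_, hocc'⟩
      rw [hLm]
      have hsum : SumL s K m + ((Lmin s K m : Int) - 1 + 1) = SumL s K (m+1) := by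
        simp [SumL, List.range_succ, hLm]
      rw [hsum]

-- ===== VERDICT (by name: the statement is the Claim_ definition above) =====
theorem getkRepValue_spec : Claim_equal_getkRepValue := by
  intro user_history k _hdom hpre
  unfold Spec_getkRepValue getkRepValue getkRepValue_alt
  rcases hpre with hnil | hk
  · simp [hnil, PySem.List.pyRange]
  · set s := user_history.toList with hs
    set K := k.toNat with hKdef
    have hkK : k = (K : Int) := by omega
    have hK : 0 < K := by omega
    obtain ⟨c, hA, -, -⟩ := A_inv s k K hkK hK s.length le_rfl
    obtain ⟨occ, hB, -⟩ := B_inv s k K hkK hK s.length le_rfl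
    rw [List.take_length] at hB
    simp only [PySem.List.len_eq, PySem.List.pyRange_zero_nat, List.foldl_map]
    rw [hA, hB]
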